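-- pv_equiv track=rewrite | github.com/Drachier/PyTreeNet | pytreenet/contractions/local_contr.py | valid_contraction_order
-- ===== SOURCE A (Python) =====
-- def valid_contraction_order(order: list[int]) -> bool:
--     """
--     Checks whether the given contraction order is valid.
--
--     A contraction order is valid if for every tensor in the order,
--     it is either the highest or lowest in the stack of already contracted
--     tensors.
--
--     Args:
--         order (list[int]): The contraction order to check.
--
--     Returns:
--         bool: True if the contraction order is valid, False otherwise.
--     """
--     if len(order) == 0:
--         return False
--     current_min = order[0]
--     current_max = order[0]
--     for index in order[1:]:
--         if index < current_min:
--             if index != current_min - 1: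
--                 return False
--             current_min = index
--         elif index > current_max:
--             if index != current_max + 1:
--                 return False
--             current_max = index
--         else:
--             return False
--     return True
-- ===== SOURCE B (Python) =====
-- def valid_contraction_order(order: list[int]) -> bool:
--     if not order:
--         return False
--     p = order[0]
--     rest = order[1:]
--     lows = [x for x in rest if x < p]
--     highs = [x for x in rest if x > p]
--     if len(lows) + len(highs) != len(rest):
--         return False
--     return (lows == [p - 1 - i for i in range(len(lows))]
--             and highs == [p + 1 + i for i in range(len(highs))])
-- ===== Notes on version B (the rewrite author's own statement) =====
-- stated objective: alternative
-- what changed: Replaces A's sequential min/max-extending scan with a one-pass partition of order[1:] into below-pivot and above-pivot sublists, each compared against the contiguous descending/ascending run it must equal, plus a length guard rejecting elements equal to the pivot.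
import Mathlib
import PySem

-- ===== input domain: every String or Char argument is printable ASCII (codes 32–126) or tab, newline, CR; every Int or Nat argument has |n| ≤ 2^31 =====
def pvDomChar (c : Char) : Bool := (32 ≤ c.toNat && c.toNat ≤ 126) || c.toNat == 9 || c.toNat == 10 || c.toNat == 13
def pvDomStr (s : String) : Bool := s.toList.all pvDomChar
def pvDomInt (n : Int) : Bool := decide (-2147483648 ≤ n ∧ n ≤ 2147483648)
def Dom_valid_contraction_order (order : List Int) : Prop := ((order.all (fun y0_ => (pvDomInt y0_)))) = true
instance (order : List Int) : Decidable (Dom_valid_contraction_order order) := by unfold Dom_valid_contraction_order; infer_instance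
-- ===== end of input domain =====

-- B replaces A's min/max-extending scan by a partition into the below-pivot and above-pivot
-- sublists, each compared against the contiguous run it must equal (objective: alternative).

-- ===== PORT A =====
-- the for-loop of A over order[1:], carrying (current_min, current_max)
def pvGoA : List Int → Int → Int → Bool
  | [], _, _ => true
  | i :: rest, mn, mx =>
    if i < mn then
      if i ≠ mn - 1 then false else pvGoA rest i mx
    else if mx < i then
      if i ≠ mx + 1 then false else pvGoA rest mn i
    else false

def valid_contraction_order (order : List Int) : Bool :=
  match order with
  | [] => false
  | p :: rest => pvGoA rest p p

-- ===== PORT B =====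
-- [s - i for i in range(n)] of Source B (s = p - 1)
def pvDesc (s : Int) (n : Nat) : List Int := (List.range n).map (fun i : Nat => s - (i : Int))

-- [s + i for i in range(n)] of Source B (s = p + 1)
def pvAsc (s : Int) (n : Nat) : List Int := (List.range n).map (fun i : Nat => s + (i : Int))

def valid_contraction_order_alt (order : List Int) : Bool :=
  match order with
  | [] => false
  | p :: rest =>
    let lows := rest.filter (fun x => decide (x < p))
    let highs := rest.filter (fun x => decide (p < x))
    if lows.length + highs.length ≠ rest.length then false
    else decide (lows = pvDesc (p - 1) lows.length) && decide (highs = pvAsc (p + 1) highs.length)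

-- ===== PRECONDITION & SPEC =====
def Spec_valid_contraction_order (order : List Int) (out : Bool) : Prop := out = valid_contraction_order_alt order
instance (order : List Int) (out : Bool) : Decidable (Spec_valid_contraction_order order out) := by unfold Spec_valid_contraction_order; infer_instance

-- ===== CLAIM (what is proved, stated in full; the proofs are below) =====
def Claim_equal_valid_contraction_order : Prop := ∀ (order : List Int), Dom_valid_contraction_order order → Spec_valid_contraction_order order (valid_contraction_order order)

-- ===== LEMMAS AND PROOFS =====

theorem pvDesc_mem_le {s : Int} {n : Nat} {x : Int} (h : x ∈ pvDesc s n) : x ≤ s := by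
  simp only [pvDesc, List.mem_map, List.mem_range] at h
  obtain ⟨i, -, rfl⟩ := h
  have : (0:Int) ≤ (i:Int) := Int.natCast_nonneg i
  omega

theorem pvAsc_mem_ge {s : Int} {n : Nat} {x : Int} (h : x ∈ pvAsc s n) : s ≤ x := by
  simp only [pvAsc, List.mem_map, List.mem_range] at h
  obtain ⟨i, -, rfl⟩ := h
  have : (0:Int) ≤ (i:Int) := Int.natCast_nonneg i
  omega

theorem pvDesc_succ (s : Int) (n : Nat) : pvDesc s (n + 1) = s :: pvDesc (s - 1) n := by
  simp only [pvDesc, List.range_succ_eq_map, List.map_cons, List.map_map]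
  congr 1
  · simp
  · apply List.map_congr_left
    intro i _
    simp only [Function.comp_apply]
    push_cast
    ring

theorem pvAsc_succ (s : Int) (n : Nat) : pvAsc s (n + 1) = s :: pvAsc (s + 1) n := by
  simp only [pvAsc, List.range_succ_eq_map, List.map_cons, List.map_map]
  congr 1
  · simp
  · apply List.map_congr_left
    intro i _
    simp only [Function.comp_apply]
    push_cast
    ring

-- the two filters select disjoint elements, so their lengths sum to at most the list length
theorem filter_disjoint_length_le (l : List Int) (p q : Int → Bool)
    (h : ∀ x, ¬(p x = true ∧ q x = true)) :
    (l.filter p).length + (l.filter q).length ≤ l.length := by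
  induction l with
  | nil => simp
  | cons a l ih =>
    by_cases hp : p a = true
    · by_cases hq : q a = true
      · exact absurd ⟨hp, hq⟩ (h a)
      · simp [List.filter_cons, hp, hq] <;> omega
    · by_cases hq : q a = true
      · simp [List.filter_cons, hp, hq] <;> omega
      · simp [List.filter_cons, hp, hq] <;> omega

-- loop invariant: A's loop accepts iff the strictly-below-min part is the descending run from
-- mn-1, the strictly-above-max part is the ascending run from mx+1, and nothing else remains
theorem pvGoA_iff (rest : List Int) (mn mx : Int) (h : mn ≤ mx) :
    pvGoA rest mn mx = true ↔
      (rest.filter (fun x => decide (x < mn)) =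
          pvDesc (mn - 1) (rest.filter (fun x => decide (x < mn))).length ∧
       rest.filter (fun x => decide (mx < x)) =
          pvAsc (mx + 1) (rest.filter (fun x => decide (mx < x))).length ∧
       (rest.filter (fun x => decide (x < mn))).length +
          (rest.filter (fun x => decide (mx < x))).length = rest.length) := by
  induction rest generalizing mn mx with
  | nil => simp [pvGoA, pvDesc, pvAsc]
  | cons i rest ih =>
    have hdisj : ∀ x : Int, ¬((decide (x < mn) = true) ∧ (decide (mx < x) = true)) := by
      intro x hx; simp at hx; omega
    by_cases h1 : i < mn
    · have hnm : ¬ (mx < i) := by omega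
      by_cases h2 : i = mn - 1
      · subst h2
        have hmn' : mn - 1 ≤ mx := by omega
        rw [show pvGoA ((mn - 1) :: rest) mn mx = pvGoA rest (mn - 1) mx by
              simp [pvGoA, h1]]
        rw [ih (mn - 1) mx hmn']
        have hlow : ((mn - 1) :: rest).filter (fun x => decide (x < mn)) =
            (mn - 1) :: rest.filter (fun x => decide (x < mn)) := by
          simp [List.filter_cons, h1]
        have hhigh : ((mn - 1) :: rest).filter (fun x => decide (mx < x)) =
            rest.filter (fun x => decide (mx < x)) := by
          simp [List.filter_cons]; omega
        rw [hlow, hhigh]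
        set F := rest.filter (fun x => decide (x < mn)) with hF
        set F' := rest.filter (fun x => decide (x < mn - 1)) with hF'
        set H := rest.filter (fun x => decide (mx < x)) with hH
        have hsub : List.Sublist F' F := by
          have : F' = F.filter (fun x => decide (x < mn - 1)) := by
            rw [hF, hF', List.filter_filter]
            exact (List.filter_congr (by intro x _; simp; omega)).symm
          rw [this]; exact List.filter_sublist
        have hle : F.length + H.length ≤ rest.length :=
          filter_disjoint_length_le rest _ _ hdisj
        simp only [List.length_cons, pvDesc_succ, List.cons.injEq, true_and]
        constructor
        · rintro ⟨hd, hhi, hlen⟩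
          have hlen' : F'.length = F.length := by
            have := hsub.length_le; omega
          have hFF' : F' = F := hsub.eq_of_length hlen'
          refine ⟨by rw [← hFF']; exact hd, hhi, by omega⟩
        · rintro ⟨hd, hhi, hlen⟩
          have hFF' : F' = F := by
            have hself : F.filter (fun x => decide (x < mn - 1)) = F := by
              apply List.filter_eq_self.2
              intro x hx
              have hx' : x ∈ pvDesc (mn - 1 - 1) F.length := by rw [← hd]; exact hx
              have := pvDesc_mem_le hx'
              simp; omega
            have hFeq : F' = F.filter (fun x => decide (x < mn - 1)) := by
              rw [hF, hF', List.filter_filter]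
              exact (List.filter_congr (by intro x _; simp; omega)).symm
            rw [hFeq, hself]
          refine ⟨by rw [hFF']; exact hd, hhi, by rw [hFF']; omega⟩
      · rw [show pvGoA (i :: rest) mn mx = false by simp [pvGoA, h1, h2]]
        simp only [Bool.false_eq_true, false_iff]
        rintro ⟨hd, -, -⟩
        rw [List.filter_cons_of_pos (by simpa using h1)] at hd
        simp only [List.length_cons, pvDesc_succ, List.cons.injEq] at hd
        exact h2 hd.1
    · by_cases h2 : mx < i
      · have hlow : (i :: rest).filter (fun x => decide (x < mn)) =
            rest.filter (fun x => decide (x < mn)) := by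
          simp [List.filter_cons]; omega
        by_cases h3 : i = mx + 1
        · subst h3
          have hmx' : mn ≤ mx + 1 := by omega
          rw [show pvGoA ((mx + 1) :: rest) mn mx = pvGoA rest mn (mx + 1) by
                simp [pvGoA, h1, h2]]
          rw [ih mn (mx + 1) hmx']
          have hhigh : ((mx + 1) :: rest).filter (fun x => decide (mx < x)) =
              (mx + 1) :: rest.filter (fun x => decide (mx < x)) := by
            simp
          rw [hlow, hhigh]
          set F := rest.filter (fun x => decide (x < mn)) with hF
          set H := rest.filter (fun x => decide (mx < x)) with hH
          set H' := rest.filter (fun x => decide (mx + 1 < x)) with hH'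
          have hsub : List.Sublist H' H := by
            have : H' = H.filter (fun x => decide (mx + 1 < x)) := by
              rw [hH, hH', List.filter_filter]
              exact (List.filter_congr (by intro x _; simp; omega)).symm
            rw [this]; exact List.filter_sublist
          have hle : F.length + H.length ≤ rest.length :=
            filter_disjoint_length_le rest _ _ hdisj
          simp only [List.length_cons, pvAsc_succ, List.cons.injEq, true_and]
          constructor
          · rintro ⟨hlo, ha, hlen⟩
            have hlen' : H'.length = H.length := by
              have := hsub.length_le; omega
            have hHH' : H' = H := hsub.eq_of_length hlen'
            refine ⟨hlo, by rw [← hHH']; exact ha, by omega⟩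
          · rintro ⟨hlo, ha, hlen⟩
            have hHH' : H' = H := by
              have hself : H.filter (fun x => decide (mx + 1 < x)) = H := by
                apply List.filter_eq_self.2
                intro x hx
                have hx' : x ∈ pvAsc (mx + 1 + 1) H.length := by rw [← ha]; exact hx
                have := pvAsc_mem_ge hx'
                simp; omega
              have hHeq : H' = H.filter (fun x => decide (mx + 1 < x)) := by
                rw [hH, hH', List.filter_filter]
                exact (List.filter_congr (by intro x _; simp; omega)).symm
              rw [hHeq, hself]
            refine ⟨hlo, by rw [hHH']; exact ha, by rw [hHH']; omega⟩
        · rw [show pvGoA (i :: rest) mn mx = false by simp [pvGoA, h1, h2, h3]]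
          simp only [Bool.false_eq_true, false_iff]
          rintro ⟨-, ha, -⟩
          rw [List.filter_cons_of_pos (by simpa using h2)] at ha
          simp only [List.length_cons, pvAsc_succ, List.cons.injEq] at ha
          exact h3 ha.1
      · rw [show pvGoA (i :: rest) mn mx = false by simp [pvGoA, h1, h2]]
        simp only [Bool.false_eq_true, false_iff]
        rintro ⟨-, -, hlen⟩
        have hlow : (i :: rest).filter (fun x => decide (x < mn)) =
            rest.filter (fun x => decide (x < mn)) := by
          simp [List.filter_cons]; omega
        have hhigh : (i :: rest).filter (fun x => decide (mx < x)) =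
            rest.filter (fun x => decide (mx < x)) := by
          simp [List.filter_cons]; omega
        rw [hlow, hhigh, List.length_cons] at hlen
        have := filter_disjoint_length_le rest (fun x => decide (x < mn))
          (fun x => decide (mx < x)) hdisj
        omega

theorem alt_iff (p : Int) (rest : List Int) :
    valid_contraction_order_alt (p :: rest) = true ↔
      (rest.filter (fun x => decide (x < p)) =
          pvDesc (p - 1) (rest.filter (fun x => decide (x < p))).length ∧
       rest.filter (fun x => decide (p < x)) =
          pvAsc (p + 1) (rest.filter (fun x => decide (p < x))).length ∧
       (rest.filter (fun x => decide (x < p))).length +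
          (rest.filter (fun x => decide (p < x))).length = rest.length) := by
  show (if _ then false else _) = true ↔ _
  split_ifs with hg
  · simp only [Bool.false_eq_true, false_iff]
    rintro ⟨-, -, hlen⟩; exact hg hlen
  · simp only [Bool.and_eq_true, decide_eq_true_eq]
    push_neg at hg
    exact ⟨fun ⟨a, b⟩ => ⟨a, b, hg⟩, fun ⟨a, b, _⟩ => ⟨a, b⟩⟩

-- ===== VERDICT (by name: the statement is the Claim_ definition above) =====
theorem valid_contraction_order_spec : Claim_equal_valid_contraction_order := by
  intro order _
  unfold Spec_valid_contraction_order
  match order with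
  | [] => rfl
  | p :: rest =>
    have hA := pvGoA_iff rest p p (le_refl p)
    have hB := alt_iff p rest
    show pvGoA rest p p = valid_contraction_order_alt (p :: rest)
    cases ha : pvGoA rest p p with
    | true => exact (hB.2 (hA.1 ha)).symm
    | false =>
      cases hb : valid_contraction_order_alt (p :: rest) with
      | false => rfl
      | true => exact absurd (hA.2 (hB.1 hb)) (by simp [ha])
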